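-- pv_equiv track=rewrite | github.com/Rajchal/automation-scripts | python/aws-eni-unattached-auditor.py | matches_required
-- ===== SOURCE A (Python) =====
-- from typing import List, Dict, Any, Optional
--
-- def tags_dict(tags_list: List[Dict[str, str]]):
--     return {t.get('Key'): t.get('Value') for t in (tags_list or [])}
--
-- def matches_required(eni: Dict[str, Any], needed: Dict[str, str]) -> bool:
--     if not needed:
--         return True
--     # NetworkInterface shapes commonly use 'TagSet'; some environments expose 'Tags'. Handle both.
--     tag_list = eni.get('TagSet') or eni.get('Tags') or []
--     t = tags_dict(tag_list)
--     for k, v in needed.items():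
--         if t.get(k) != v:
--             return False
--     return True
-- ===== SOURCE B (Python) =====
-- def matches_required(eni, needed):
--     # Different algorithm: one reverse pass deduplicates tags into the set of
--     # effective (key, value) pairs (first-wins over reversed = last-wins), then
--     # the check is a plain set-subset test of the required items.
--     tag_list = eni.get('TagSet') or eni.get('Tags') or []
--     effective = set()
--     seen = set()
--     for t in reversed(tag_list):
--         k = t.get('Key')
--         if k not in seen:
--             seen.add(k)
--             effective.add((k, t.get('Value')))
--     return set(needed.items()) <= effective
-- ===== Notes on version B (the rewrite author's own statement) =====
-- stated objective: alternative
-- what changed: B replaces the per-required-key dict lookups with a single reverse pass that deduplicates tags into the set of effective (key, value) pairs and then tests required.items() as a set-subset, with no early return and no per-key comparison loop.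
import Mathlib
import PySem

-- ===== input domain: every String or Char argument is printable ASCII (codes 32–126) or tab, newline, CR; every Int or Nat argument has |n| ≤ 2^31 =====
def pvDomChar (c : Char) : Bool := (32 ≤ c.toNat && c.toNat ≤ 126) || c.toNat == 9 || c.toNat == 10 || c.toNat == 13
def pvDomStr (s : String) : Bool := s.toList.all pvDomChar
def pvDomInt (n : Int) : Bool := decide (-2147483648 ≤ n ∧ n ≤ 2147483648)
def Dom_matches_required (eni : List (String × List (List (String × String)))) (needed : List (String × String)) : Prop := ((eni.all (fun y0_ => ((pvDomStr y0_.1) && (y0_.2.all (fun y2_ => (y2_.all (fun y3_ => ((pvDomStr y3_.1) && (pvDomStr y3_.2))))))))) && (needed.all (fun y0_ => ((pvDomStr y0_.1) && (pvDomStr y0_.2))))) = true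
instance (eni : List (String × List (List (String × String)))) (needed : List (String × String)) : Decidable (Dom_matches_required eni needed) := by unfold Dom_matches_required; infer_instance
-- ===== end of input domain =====

-- B replaces A's dict-then-lookup check by a single reverse pass that deduplicates
-- the tags into the set of effective (key, value) pairs and a set-subset test.


-- ===== PORT A =====
-- `x or y` on list-valued operands: empty/missing is falsy
def pyOrList (o : Option (List (List (String × String)))) (fb : List (List (String × String))) : List (List (String × String)) :=
  match o with
  | some l => if l.isEmpty then fb else l
  | none => fb

-- tags_dict: {t.get('Key'): t.get('Value') for t in (tags_list or [])}
def tags_dict (tags_list : List (List (String × String))) : PySem.Dict (Option String) (Option String) :=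
  tags_list.foldl
    (fun d t =>
      d.insert ((PySem.Dict.ofList t).get? "Key") ((PySem.Dict.ofList t).get? "Value"))
    PySem.Dict.empty

-- the for-loop over needed.items() with early return False
def loopA (t : PySem.Dict (Option String) (Option String)) : List (String × String) → Bool
  | [] => true
  | (k, v) :: rest =>
      if (t.get? (some k)).getD none ≠ some v then false else loopA t rest

def matches_required (eni : List (String × List (List (String × String)))) (needed : List (String × String)) : Bool :=
  if needed.isEmpty then true
  else
    let tag_list := pyOrList ((PySem.Dict.ofList eni).get? "TagSet")
                      (pyOrList ((PySem.Dict.ofList eni).get? "Tags") [])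
    let t := tags_dict tag_list
    loopA t needed

-- ===== PORT B =====
-- loop body: if k not in seen: seen.add(k); effective.add((k, t.get('Value')))
def dedupStep (p : PySem.Set (Option String) × PySem.Set (Option String × Option String))
    (t : List (String × String)) :
    PySem.Set (Option String) × PySem.Set (Option String × Option String) :=
  let k := (PySem.Dict.ofList t).get? "Key"
  if PySem.Set.contains p.1 k then p
  else (PySem.Set.add p.1 k, PySem.Set.add p.2 (k, (PySem.Dict.ofList t).get? "Value"))

def matches_required_alt (eni : List (String × List (List (String × String)))) (needed : List (String × String)) : Bool :=
  let tag_list := pyOrList ((PySem.Dict.ofList eni).get? "TagSet")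
                    (pyOrList ((PySem.Dict.ofList eni).get? "Tags") [])
  let se := tag_list.reverse.foldl dedupStep (PySem.Set.empty, PySem.Set.empty)
  PySem.Set.issubset (PySem.Set.ofList (needed.map (fun p => (some p.1, some p.2)))) se.2

-- ===== PRECONDITION & SPEC =====
def Spec_matches_required (eni : List (String × List (List (String × String)))) (needed : List (String × String)) (out : Bool) : Prop := out = matches_required_alt eni needed
instance (eni : List (String × List (List (String × String)))) (needed : List (String × String)) (out : Bool) : Decidable (Spec_matches_required eni needed out) := by unfold Spec_matches_required; infer_instance

-- ===== CLAIM =====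
def Claim_equal_matches_required : Prop := ∀ (eni : List (String × List (List (String × String)))) (needed : List (String × String)), Dom_matches_required eni needed → Spec_matches_required eni needed (matches_required eni needed)

-- ===== LEMMAS AND PROOFS =====

-- value of the FIRST tag in tl whose Key is K (none = no such tag)
def firstGet : List (List (String × String)) → Option String → Option (Option String)
  | [], _ => none
  | t :: rest, K =>
      if (PySem.Dict.ofList t).get? "Key" = K then some ((PySem.Dict.ofList t).get? "Value")
      else firstGet rest K

theorem firstGet_append (a b : List (List (String × String))) (K : Option String) :
    firstGet (a ++ b) K = (firstGet a K).or (firstGet b K) := by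
  induction a with
  | nil => simp [firstGet]
  | cons t rest ih =>
      simp only [List.cons_append, firstGet, ih]
      split <;> simp

-- A's dict built by tags_dict, looked up at K, is the value at the LAST matching tag
theorem tags_dict_getD_aux (K : Option String) :
    ∀ (tl : List (List (String × String))) (d : PySem.Dict (Option String) (Option String))
      (acc : Option String), (d.get? K).getD none = acc →
      ((tl.foldl
          (fun d t =>
            d.insert ((PySem.Dict.ofList t).get? "Key") ((PySem.Dict.ofList t).get? "Value"))
          d).get? K).getD none
        = tl.foldl
            (fun acc t =>
              if (PySem.Dict.ofList t).get? "Key" = K then (PySem.Dict.ofList t).get? "Value" else acc)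
            acc := by
  intro tl
  induction tl with
  | nil => intro d acc h; simpa using h
  | cons t rest ih =>
      intro d acc h
      simp only [List.foldl_cons]
      apply ih
      by_cases hk : (PySem.Dict.ofList t).get? "Key" = K
      · rw [hk, if_pos rfl]
        simp [PySem.Dict.get?_insert_self]
      · rw [if_neg hk, PySem.Dict.get?_insert, if_neg (fun h' => hk h'.symm)]
        exact h

-- the last-wins fold equals the FIRST match over the reversed list
theorem foldl_last_eq_firstGet_reverse (K : Option String) :
    ∀ (tl : List (List (String × String))) (acc : Option String),
      tl.foldl
          (fun acc t =>
            if (PySem.Dict.ofList t).get? "Key" = K then (PySem.Dict.ofList t).get? "Value" else acc)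
          acc
        = (firstGet tl.reverse K).getD acc := by
  intro tl
  induction tl with
  | nil => intro acc; simp [firstGet]
  | cons t rest ih =>
      intro acc
      simp only [List.foldl_cons, List.reverse_cons, firstGet_append, ih]
      cases firstGet rest.reverse K
      · simp [firstGet]; split <;> simp
      · simp [firstGet]

theorem tags_dict_get_eq_firstGet (tl : List (List (String × String))) (K : Option String) :
    ((tags_dict tl).get? K).getD none = (firstGet tl.reverse K).getD none := by
  unfold tags_dict
  rw [tags_dict_getD_aux K tl PySem.Dict.empty none (by simp)]
  exact foldl_last_eq_firstGet_reverse K tl none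

-- membership in the effective-pairs set built by B's reverse pass
theorem mem_dedup_foldl (K : Option String) (W : Option String) :
    ∀ (rl : List (List (String × String)))
      (s : PySem.Set (Option String)) (e : PySem.Set (Option String × Option String)),
      ((K, W) ∈ (rl.foldl dedupStep (s, e)).2)
        ↔ ((K, W) ∈ e ∨ (K ∉ s ∧ firstGet rl K = some W)) := by
  intro rl
  induction rl with
  | nil => intro s e; simp [firstGet]
  | cons t rest ih =>
      intro s e
      simp only [List.foldl_cons, dedupStep]
      by_cases hc : PySem.Set.contains s ((PySem.Dict.ofList t).get? "Key") = true
      · have hmem : ((PySem.Dict.ofList t).get? "Key") ∈ s :=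
          (PySem.Set.contains_iff s _).mp hc
        rw [if_pos hc, ih]
        by_cases hK : (PySem.Dict.ofList t).get? "Key" = K
        · subst hK
          simp [firstGet, hmem]
        · simp [firstGet, hK]
      · have hmem : ((PySem.Dict.ofList t).get? "Key") ∉ s :=
          fun h => hc ((PySem.Set.contains_iff s _).mpr h)
        rw [if_neg hc, ih]
        by_cases hK : (PySem.Dict.ofList t).get? "Key" = K
        · subst hK
          simp [firstGet, PySem.Set.mem_add, hmem, Prod.ext_iff, eq_comm]
        · simp [firstGet, hK, Ne.symm hK, PySem.Set.mem_add, Prod.ext_iff]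

-- A's loop over needed, characterised
theorem loopA_true_iff (d : PySem.Dict (Option String) (Option String)) :
    ∀ needed : List (String × String),
      (loopA d needed = true ↔ ∀ p ∈ needed, (d.get? (some p.1)).getD none = some p.2) := by
  intro needed
  induction needed with
  | nil => simp [loopA]
  | cons p rest ih =>
      obtain ⟨k, v⟩ := p
      simp only [loopA]
      split
      · simp only [Bool.false_eq_true, false_iff]
        intro h
        exact absurd (h (k, v) (List.mem_cons_self)) (by assumption)
      · rw [ih]
        constructor
        · rintro h q hq
          rcases List.mem_cons.mp hq with rfl | hq
          · exact not_not.mp (by assumption)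
          · exact h q hq
        · intro h q hq; exact h q (List.mem_cons_of_mem _ hq)

-- the getD-form and the firstGet-form of the per-key condition agree
theorem getD_eq_iff (o : Option (Option String)) (v : String) :
    (o.getD none = some v) ↔ o = some (some v) := by
  cases o <;> simp

-- ===== VERDICT =====
theorem matches_required_spec : Claim_equal_matches_required := by
  intro eni needed _
  unfold Spec_matches_required matches_required matches_required_alt
  set tl := pyOrList ((PySem.Dict.ofList eni).get? "TagSet")
              (pyOrList ((PySem.Dict.ofList eni).get? "Tags") []) with htl
  rw [Bool.eq_iff_iff]
  have hB : (PySem.Set.issubset (PySem.Set.ofList (needed.map (fun p => (some p.1, some p.2))))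
        (tl.reverse.foldl dedupStep (PySem.Set.empty, PySem.Set.empty)).2 = true)
      ↔ ∀ p ∈ needed, firstGet tl.reverse (some p.1) = some (some p.2) := by
    rw [PySem.Set.issubset_iff _ _]
    constructor
    · intro h p hp
      have := h (some p.1, some p.2)
        ((PySem.Set.mem_ofList _ _).mpr (List.mem_map.mpr ⟨p, hp, rfl⟩))
      have := (mem_dedup_foldl _ _ _ _ _).mp this
      rcases this with h' | ⟨_, h'⟩
      · simp [PySem.Set.empty] at h'
      · exact h'
    · intro h x hx
      rcases List.mem_map.mp ((PySem.Set.mem_ofList _ _).mp hx) with ⟨p, hp, rfl⟩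
      exact (mem_dedup_foldl _ _ _ _ _).mpr
        (Or.inr ⟨by simp [PySem.Set.empty], h p hp⟩)
  split
  · next hne =>
      rw [hB]
      simp only [true_iff]
      intro p hp
      rw [List.isEmpty_iff] at hne
      subst hne
      simp at hp
  · rw [hB, loopA_true_iff]
    constructor
    · intro h p hp
      rw [← getD_eq_iff, ← tags_dict_get_eq_firstGet]
      exact h p hp
    · intro h p hp
      rw [tags_dict_get_eq_firstGet, getD_eq_iff]
      exact h p hp
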